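-- pv_equiv track=rewrite | github.com/watchduck/discrete_helpers | discretehelpers/perm/a/inversion_related_vectors/__init__.py | inversion_set_to_count
-- ===== SOURCE A (Python) =====
-- def inversion_set_to_count(pairs, variant_left=True):
--     assert type(variant_left) is bool
--     from collections import defaultdict
--     key_to_count = defaultdict(int)
--     length = 0
--     for a, b in pairs:
--         length = max(length, a + 1, b + 1)
--         key = b if variant_left else a
--         key_to_count[key] += 1
--     vector = [0] * length
--     for key, count in key_to_count.items():
--         vector[key] = count
--     return vector
-- ===== SOURCE B (Python) =====
-- def inversion_set_to_count(pairs, variant_left=True):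
--     assert type(variant_left) is bool
--     length = max([0] + [max(a, b) + 1 for a, b in pairs])
--     vector = []
--     for key in sorted(b if variant_left else a for a, b in pairs):
--         if key < len(vector):
--             vector[-1] += 1
--         else:
--             vector.extend([0] * (key - len(vector)))
--             vector.append(1)
--     vector.extend([0] * (length - len(vector)))
--     return vector
-- ===== Notes on version B (the rewrite author's own statement) =====
-- stated objective: alternative
-- what changed: B drops the defaultdict and the items copy-out loop: it sorts the selected keys and builds the vector front-to-back in one scan (incrementing the last cell for a repeated key, padding with zeros up to each new key), then pads to the full length; Pre_ excludes inputs with a negative selected key, where A raises IndexError or writes through Python's accidental negative-index wraparound and B's front-to-back construction raises.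
-- outside the precondition, e.g. on inversion_set_to_count([(2, -1)], True): A returns [0, 0, 1], B raises IndexError
import Mathlib
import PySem

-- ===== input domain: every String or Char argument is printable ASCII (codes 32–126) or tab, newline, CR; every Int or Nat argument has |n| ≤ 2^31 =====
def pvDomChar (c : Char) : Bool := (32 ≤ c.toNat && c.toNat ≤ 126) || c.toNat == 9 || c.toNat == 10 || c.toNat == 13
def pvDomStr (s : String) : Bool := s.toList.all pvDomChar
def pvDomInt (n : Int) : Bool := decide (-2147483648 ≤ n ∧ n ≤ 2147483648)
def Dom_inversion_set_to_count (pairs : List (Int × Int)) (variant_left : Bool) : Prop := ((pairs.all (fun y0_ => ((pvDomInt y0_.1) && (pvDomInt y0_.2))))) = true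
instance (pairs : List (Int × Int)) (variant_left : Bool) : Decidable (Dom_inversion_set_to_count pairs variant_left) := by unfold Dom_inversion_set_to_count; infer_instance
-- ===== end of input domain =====

-- B replaces A's defaultdict + items copy-out loop by sorting the selected keys and
-- building the vector front-to-back in one scan over them (alternative algorithm, not faster).


-- ===== PORT A =====
-- the 'assert type(variant_left) is bool' always passes under the Bool typing and is dropped
def inversion_set_to_count (pairs : List (Int × Int)) (variant_left : Bool) : List Int :=
  let st := pairs.foldl
    (fun (st : PySem.Dict Int Int × Int) ab =>
      (st.1.modify (if variant_left then ab.2 else ab.1) 0 (· + 1),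
       max (max st.2 (ab.1 + 1)) (ab.2 + 1)))
    (PySem.Dict.empty, 0)
  st.1.items.foldl (fun vector kc => PySem.List.pySetD vector kc.1 kc.2)
    (List.replicate st.2.toNat 0)

-- ===== PORT B =====
def inversion_set_to_count_alt (pairs : List (Int × Int)) (variant_left : Bool) : List Int :=
  let length := (PySem.List.max? ((0 : Int) :: pairs.map (fun ab => max ab.1 ab.2 + 1)) (fun x => x)).getD 0
  let vector := (PySem.List.sorted (pairs.map (fun ab => if variant_left then ab.2 else ab.1)) (fun x => x) false).foldl
    (fun v key =>
      if key < (v.length : Int) then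
        -- vector[-1] += 1 (Python raises IndexError on an empty vector; Pre_ excludes that)
        PySem.List.pySetD v (-1) (PySem.List.pyGetD v (-1) 0 + 1)
      else
        (v ++ List.replicate (key - (v.length : Int)).toNat 0) ++ [1])
    ([] : List Int)
  vector ++ List.replicate (length - (vector.length : Int)).toNat 0

-- ===== PRECONDITION & SPEC =====
-- the list of selected keys (used by Pre_)
def pvKeys (pairs : List (Int × Int)) (variant_left : Bool) : List Int :=
  pairs.map (fun ab => if variant_left then ab.2 else ab.1)

-- Pre_ excludes inputs with a negative selected key: there A raises IndexError (key < -length)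
-- or returns through Python's accidental negative-index wraparound, and B raises IndexError.
def Pre_inversion_set_to_count (pairs : List (Int × Int)) (variant_left : Bool) : Prop :=
  ∀ k ∈ pvKeys pairs variant_left, 0 ≤ k
instance (pairs : List (Int × Int)) (variant_left : Bool) : Decidable (Pre_inversion_set_to_count pairs variant_left) := by unfold Pre_inversion_set_to_count; infer_instance

def pvWitness_inversion_set_to_count : (List (Int × Int)) × Bool := ([(1, 0), (2, 1), (2, 0)], true)

def Spec_inversion_set_to_count (pairs : List (Int × Int)) (variant_left : Bool) (out : List Int) : Prop := out = inversion_set_to_count_alt pairs variant_left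
instance (pairs : List (Int × Int)) (variant_left : Bool) (out : List Int) : Decidable (Spec_inversion_set_to_count pairs variant_left out) := by unfold Spec_inversion_set_to_count; infer_instance

-- ===== CLAIM (what is proved, stated in full; the proofs are below) =====
def Claim_equal_inversion_set_to_count : Prop := ∀ (pairs : List (Int × Int)) (variant_left : Bool), Dom_inversion_set_to_count pairs variant_left → Pre_inversion_set_to_count pairs variant_left → Spec_inversion_set_to_count pairs variant_left (inversion_set_to_count pairs variant_left)

-- ===== LEMMAS AND PROOFS =====

-- A's computed vector length
def pvLen (pairs : List (Int × Int)) : Int :=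
  pairs.foldl (fun n ab => max (max n (ab.1 + 1)) (ab.2 + 1)) 0

-- the canonical count vector: position i holds the multiplicity of i among the keys
def pvCnt (keys : List Int) (L : Int) : List Int :=
  (List.range L.toNat).map (fun (i : Nat) => (keys.count ((i : Int)) : Int))

theorem pvCnt_length (keys : List Int) (L : Int) : (pvCnt keys L).length = L.toNat := by
  simp [pvCnt]

theorem pvCnt_getElem (keys : List Int) (L : Int) (j : Nat) (h : j < (pvCnt keys L).length) :
    (pvCnt keys L)[j] = (keys.count (j : Int) : Int) := by
  unfold pvCnt
  rw [List.getElem_map, List.getElem_range]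

-- A's combined fold splits into the counter fold over the keys and the length fold
theorem pvFoldA_eq (vl : Bool) (pairs : List (Int × Int)) (d : PySem.Dict Int Int) (n : Int) :
    pairs.foldl
      (fun (st : PySem.Dict Int Int × Int) ab =>
        (st.1.modify (if vl then ab.2 else ab.1) 0 (· + 1),
         max (max st.2 (ab.1 + 1)) (ab.2 + 1))) (d, n)
    = ((pairs.map (fun ab => if vl then ab.2 else ab.1)).foldl
         (fun d k => d.modify k 0 (· + 1)) d,
       pairs.foldl (fun n ab => max (max n (ab.1 + 1)) (ab.2 + 1)) n) := by
  induction pairs generalizing d n with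
  | nil => rfl
  | cons p t ih => simp only [List.foldl_cons, List.map_cons, ih]

theorem pvLen_eq_foldl_max (pairs : List (Int × Int)) :
    pvLen pairs = pairs.foldl (fun acc ab => max acc (max (ab.1 + 1) (ab.2 + 1))) 0 := by
  unfold pvLen; congr 1; funext n ab; rw [max_assoc]

theorem pvLen_nonneg (pairs : List (Int × Int)) : 0 ≤ pvLen pairs := by
  rw [pvLen_eq_foldl_max]
  exact (PySem.List.le_foldl_max_int pairs (fun ab => max (ab.1 + 1) (ab.2 + 1)) 0).1

theorem pv_key_lt_len {pairs : List (Int × Int)} {vl : Bool} {k : Int}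
    (hk : k ∈ pvKeys pairs vl) : k < pvLen pairs := by
  rw [pvLen_eq_foldl_max]
  obtain ⟨ab, hab, rfl⟩ := List.mem_map.mp hk
  have h := (PySem.List.le_foldl_max_int pairs (fun ab => max (ab.1 + 1) (ab.2 + 1)) 0).2 ab hab
  have h1 := le_max_left (ab.1 + 1) (ab.2 + 1)
  have h2 := le_max_right (ab.1 + 1) (ab.2 + 1)
  split <;> omega

-- B's length expression equals A's running length
theorem pvLenB_eq (pairs : List (Int × Int)) :
    (PySem.List.max? ((0 : Int) :: pairs.map (fun ab => max ab.1 ab.2 + 1)) (fun x => x)).getD 0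
      = pvLen pairs := by
  rw [PySem.List.max?_id_cons, Option.getD_some, List.foldl_map]
  unfold pvLen; congr 1; funext n ab
  rw [max_assoc, max_add_add_right]

-- === A side: scattering the counter items into the zero vector gives the count vector ===

theorem pvScatter_length (S : List (Int × Int)) (v : List Int) :
    (S.foldl (fun w kc => PySem.List.pySetD w kc.1 kc.2) v).length = v.length := by
  induction S generalizing v with
  | nil => rfl
  | cons kc t ih => simp only [List.foldl_cons, ih, PySem.List.length_pySetD]

theorem pvScatter_getD (S : List (Int × Int)) (v : List Int)
    (hS : ∀ kc ∈ S, 0 ≤ kc.1 ∧ kc.1 < (v.length : Int))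
    (hinj : S.Pairwise (fun p q => p.1 ≠ q.1)) (j : Nat) :
    (S.foldl (fun w kc => PySem.List.pySetD w kc.1 kc.2) v).getD j 0 =
      match S.find? (fun kc => kc.1 == (j : Int)) with
      | some kc => kc.2
      | none => v.getD j 0 := by
  induction S generalizing v with
  | nil => rfl
  | cons kc t ih =>
    obtain ⟨h0, h1⟩ := hS kc (by simp)
    have hlen' : (PySem.List.pySetD v kc.1 kc.2).length = v.length :=
      PySem.List.length_pySetD v kc.1 kc.2
    have hrec := ih (PySem.List.pySetD v kc.1 kc.2)
      (by intro q hq; rw [hlen']; exact hS q (List.mem_cons_of_mem _ hq))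
      hinj.of_cons
    rw [List.foldl_cons, hrec]
    by_cases hp : kc.1 = (j : Int)
    · have hnone : t.find? (fun q => q.1 == (j : Int)) = none := by
        rw [List.find?_eq_none]
        intro q hq
        have := (List.pairwise_cons.mp hinj).1 q hq
        simp only [beq_iff_eq]; omega
      simp only [List.find?_cons, hp, beq_self_eq_true, hnone]
      rw [PySem.List.pySetD_of_nonneg v kc.2 (by omega : (0:Int) ≤ (j:Int))]
      have hj : j < v.length := by omega
      simp [List.getD, hj]
    · have : (kc.1 == (j : Int)) = false := by simp [hp]
      simp only [List.find?_cons, this]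
      cases hfind : t.find? (fun q => q.1 == (j : Int)) with
      | some q => rfl
      | none =>
        rw [PySem.List.pySetD_of_nonneg v kc.2 h0]
        simp [List.getD, List.getElem?_set_ne (by omega : kc.1.toNat ≠ j)]

theorem pvA_core (keys : List Int) (L : Int) (hL0 : 0 ≤ L)
    (hlt : ∀ k ∈ keys, k < L) (hge : ∀ k ∈ keys, 0 ≤ k) :
    (PySem.Dict.counter keys).items.foldl
        (fun v kc => PySem.List.pySetD v kc.1 kc.2) (List.replicate L.toNat 0)
      = pvCnt keys L := by
  have hmemIn : ∀ kc ∈ (PySem.Dict.counter keys).items,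
      0 ≤ kc.1 ∧ kc.1 < ((List.replicate L.toNat (0:Int)).length : Int) := by
    intro kc hkc
    rw [PySem.Dict.items_counter] at hkc
    obtain ⟨k, hkset, rfl⟩ := List.mem_map.mp hkc
    have hk := (PySem.Set.mem_ofList keys k).mp hkset
    have := hlt k hk; have := hge k hk
    rw [List.length_replicate]
    constructor <;> omega
  have hinj : (PySem.Dict.counter keys).items.Pairwise (fun p q => p.1 ≠ q.1) := by
    rw [PySem.Dict.items_counter, List.pairwise_map]
    exact (PySem.Set.nodup_ofList keys).imp (fun h => h)
  apply List.ext_getElem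
  · rw [pvScatter_length, List.length_replicate, pvCnt_length]
  · intro j h1 h2
    rw [pvCnt_getElem]
    rw [← List.getD_eq_getElem _ 0 h1]
    rw [pvScatter_getD _ _ hmemIn hinj j]
    have hjL : j < L.toNat := by
      rw [pvScatter_length, List.length_replicate] at h1; exact h1
    cases hfind : (PySem.Dict.counter keys).items.find? (fun kc => kc.1 == (j : Int)) with
    | none =>
      have hnone := List.find?_eq_none.mp hfind
      have c1 : (j : Int) ∉ keys := by
        intro hmem
        have hkc : ((j:Int), (keys.count (j:Int) : Int)) ∈ (PySem.Dict.counter keys).items := by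
          rw [PySem.Dict.items_counter]
          exact List.mem_map.mpr ⟨(j:Int), (PySem.Set.mem_ofList keys (j:Int)).mpr hmem, rfl⟩
        have := hnone _ hkc
        simp at this
      rw [List.count_eq_zero.mpr c1]
      simp [List.getD, hjL]
    | some kc =>
      have hp : kc.1 = (j : Int) := by
        have := List.find?_some hfind
        simpa using this
      have hmem : kc ∈ (PySem.Dict.counter keys).items := List.mem_of_find?_eq_some hfind
      rw [PySem.Dict.items_counter] at hmem
      obtain ⟨k, hkset, rfl⟩ := List.mem_map.mp hmem
      simp only at hp
      rw [hp]

-- === B side: the fold over the sorted keys builds the count vector ===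

-- the length B's vector has after the loop: one past the largest key seen (0 when none)
def pvM (s : List Int) : Int := (s.getLast?.getD (-1)) + 1

theorem pvM_nonneg (s : List Int) (h0 : ∀ k ∈ s, 0 ≤ k) : 0 ≤ pvM s := by
  unfold pvM
  cases h : s.getLast? with
  | none => simp
  | some x =>
    have hx : x ∈ s := List.mem_of_getLast? h
    have := h0 x hx
    simp; omega

theorem pvSetD_neg_one (xs : List Int) (v : Int) (h : xs ≠ []) :
    PySem.List.pySetD xs (-1) v = xs.set (xs.length - 1) v := by
  have hl : xs.length ≠ 0 := by simpa using h
  simp only [PySem.List.pySetD, PySem.List.pySet?, PySem.List.pyIdx?]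
  split_ifs with h1 h2 <;> first | rfl | omega

theorem pvB_loop (s : List Int) (hs : s.Pairwise (· ≤ ·)) (h0 : ∀ k ∈ s, 0 ≤ k) :
    s.foldl
      (fun v key =>
        if key < (v.length : Int) then
          PySem.List.pySetD v (-1) (PySem.List.pyGetD v (-1) 0 + 1)
        else
          (v ++ List.replicate (key - (v.length : Int)).toNat 0) ++ [1])
      ([] : List Int)
    = pvCnt s (pvM s) ∧ (∀ k ∈ s, k < pvM s) := by
  induction s using List.reverseRecOn with
  | nil => exact ⟨rfl, by simp⟩
  | append_singleton s' k ih =>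
    have hs' : s'.Pairwise (· ≤ ·) := (List.pairwise_append.mp hs).1
    have hle : ∀ x ∈ s', x ≤ k := by
      have h2 := (List.pairwise_append.mp hs).2.2
      intro x hx; exact h2 x hx k (by simp)
    have h0' : ∀ x ∈ s', 0 ≤ x := fun x hx => h0 x (by simp [hx])
    have hk0 : 0 ≤ k := h0 k (by simp)
    obtain ⟨ihv, ihb⟩ := ih hs' h0'
    have hM0 : 0 ≤ pvM s' := pvM_nonneg s' h0'
    have hMnew : pvM (s' ++ [k]) = k + 1 := by
      simp [pvM]
    have hbound' : ∀ x ∈ s' ++ [k], x < pvM (s' ++ [k]) := by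
      rw [hMnew]; intro x hx
      rcases List.mem_append.mp hx with h | h
      · have := hle x h; omega
      · simp at h; omega
    refine ⟨?_, hbound'⟩
    rw [List.foldl_append, ihv, List.foldl_cons, List.foldl_nil]
    have hlen : ((pvCnt s' (pvM s')).length : Int) = pvM s' := by
      rw [pvCnt_length]; omega
    by_cases hcase : k < pvM s'
    · -- repeated key: k equals the last key already placed
      rw [if_pos (by omega)]
      have hklast : k = pvM s' - 1 := by
        unfold pvM at hcase ⊢
        cases h : s'.getLast? with
        | none => simp [h] at hcase; omega
        | some x =>
          have hx : x ∈ s' := List.mem_of_getLast? h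
          have := hle x hx
          simp [h] at hcase ⊢; omega
      have hne : pvCnt s' (pvM s') ≠ [] := by
        intro hnil
        have := congrArg List.length hnil
        rw [pvCnt_length] at this
        simp at this; omega
      rw [PySem.List.pyGetD_neg_one _ _ hne, pvSetD_neg_one _ _ hne]
      apply List.ext_getElem
      · simp [pvCnt_length]; omega
      · intro j h1 h2
        rw [pvCnt_getElem, List.count_append]
        have hj : j < (pvCnt s' (pvM s')).length := by
          simpa using h1
        rw [List.getElem_set]
        have hjM : j < (pvM s').toNat := by rw [pvCnt_length] at hj; exact hj
        by_cases hjl : j = (pvCnt s' (pvM s')).length - 1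
        · rw [if_pos hjl.symm]
          have hjk : (j : Int) = k := by rw [pvCnt_length] at hjl; omega
          have hget : (pvCnt s' (pvM s')).getLast hne
              = (s'.count ((j : Int)) : Int) := by
            rw [List.getLast_eq_getElem, pvCnt_getElem, ← hjl]
          rw [hget, hjk]
          simp
        · rw [if_neg (fun h => hjl h.symm), pvCnt_getElem]
          have hjk : (j : Int) ≠ k := by rw [pvCnt_length] at hjl; omega
          simp [List.count_singleton, Ne.symm hjk]
    · -- new key: pad with zeros and start a cell of count 1
      rw [if_neg (by omega)]
      have hkM : pvM s' ≤ k := by omega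
      have hN : (pvCnt s' (pvM s')).length = (pvM s').toNat := pvCnt_length s' (pvM s')
      have hR : (k - ((pvCnt s' (pvM s')).length : Int)).toNat = (k - pvM s').toNat := by
        rw [hN]; congr 1; omega
      apply List.ext_getElem
      · simp [pvCnt_length, hN, hR]; omega
      · intro j h1 h2
        rw [pvCnt_getElem, List.count_append]
        have hjtot : j < (pvM s').toNat + (k - pvM s').toNat + 1 := by
          simp only [List.length_append, hN, List.length_replicate, hR,
            List.length_cons, List.length_nil] at h1
          omega
        by_cases hz2 : j < (pvM s').toNat
        · have hin : j < ((pvCnt s' (pvM s')) ++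
              List.replicate (k - ((pvCnt s' (pvM s')).length : Int)).toNat 0).length := by
            simp [hN, hR]; omega
          rw [List.getElem_append_left hin, List.getElem_append_left (hN ▸ hz2), pvCnt_getElem]
          have hjk : (j : Int) ≠ k := by omega
          simp [List.count_singleton, Ne.symm hjk]
        · by_cases hz3 : j < (pvM s').toNat + (k - pvM s').toNat
          · have hin : j < ((pvCnt s' (pvM s')) ++
                List.replicate (k - ((pvCnt s' (pvM s')).length : Int)).toNat 0).length := by
              simp [hN, hR]; omega
            rw [List.getElem_append_left hin, List.getElem_append_right (by rw [hN]; omega),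
              List.getElem_replicate]
            have hjk : (j : Int) ≠ k := by omega
            have hc : ((j : Int)) ∉ s' := fun hm => by have := ihb _ hm; omega
            simp [List.count_eq_zero.mpr hc, List.count_singleton, Ne.symm hjk]
          · have hout : ((pvCnt s' (pvM s')) ++
                List.replicate (k - ((pvCnt s' (pvM s')).length : Int)).toNat 0).length ≤ j := by
              simp [hN, hR]; omega
            rw [List.getElem_append_right hout]
            have hjk : (j : Int) = k := by omega
            have hc : ((j : Int)) ∉ s' := fun hm => by have := ihb _ hm; omega
            simp [List.count_eq_zero.mpr hc, List.count_singleton, hjk.symm]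

theorem pvB_pad (keys : List Int) (M L : Int) (h0 : 0 ≤ M) (hML : M ≤ L)
    (hbound : ∀ k ∈ keys, k < M) :
    pvCnt keys M ++ List.replicate (L - M).toNat 0 = pvCnt keys L := by
  apply List.ext_getElem
  · simp [pvCnt_length]; omega
  · intro j h1 h2
    conv_rhs => rw [pvCnt_getElem]
    by_cases hj : j < (pvCnt keys M).length
    · rw [List.getElem_append_left hj, pvCnt_getElem]
    · rw [List.getElem_append_right (not_lt.mp hj)]
      have hjM : M ≤ (j : Int) := by rw [pvCnt_length] at hj; omega
      have hc : ((j : Int)) ∉ keys := fun hm => by have := hbound _ hm; omega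
      simp [List.count_eq_zero.mpr hc]

theorem pv_main (pairs : List (Int × Int)) (vl : Bool)
    (hpre : Pre_inversion_set_to_count pairs vl) :
    inversion_set_to_count pairs vl = inversion_set_to_count_alt pairs vl := by
  unfold Pre_inversion_set_to_count at hpre
  simp only [inversion_set_to_count, inversion_set_to_count_alt, pvFoldA_eq,
    ← PySem.Dict.counter_eq_foldl, pvLenB_eq]
  have hkeysdef : List.map (fun (ab : Int × Int) => if vl = true then ab.2 else ab.1) pairs = pvKeys pairs vl := rfl
  rw [hkeysdef]
  set keys := pvKeys pairs vl with hkeys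
  have hA : (PySem.Dict.counter keys).items.foldl
      (fun v kc => PySem.List.pySetD v kc.1 kc.2)
      (List.replicate (pairs.foldl (fun (n : Int) (ab : Int × Int) => max (max n (ab.1 + 1)) (ab.2 + 1)) 0).toNat 0)
      = pvCnt keys (pvLen pairs) := by
    exact pvA_core keys (pvLen pairs) (pvLen_nonneg pairs)
      (fun k hk => pv_key_lt_len hk) hpre
  rw [hA]
  set s := PySem.List.sorted keys (fun x => x) false with hsdef
  have hperm : s.Perm keys := PySem.List.sorted_perm keys (fun x => x) false
  have hpw : s.Pairwise (· ≤ ·) := PySem.List.sorted_pairwise keys (fun x => x)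
  have h0s : ∀ k ∈ s, 0 ≤ k := fun k hk => hpre k (hperm.mem_iff.mp hk)
  obtain ⟨hloop, hbnd⟩ := pvB_loop s hpw h0s
  rw [hloop]
  have hM0 : 0 ≤ pvM s := pvM_nonneg s h0s
  have hML : pvM s ≤ pvLen pairs := by
    unfold pvM
    cases h : s.getLast? with
    | none => simpa using pvLen_nonneg pairs
    | some x =>
      have hx : x ∈ s := List.mem_of_getLast? h
      have := pv_key_lt_len (hperm.mem_iff.mp hx)
      simp; omega
  have hlenv : ((pvCnt s (pvM s)).length : Int) = pvM s := by
    rw [pvCnt_length]; omega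
  rw [hlenv, pvB_pad s (pvM s) (pvLen pairs) hM0 hML hbnd]
  unfold pvCnt
  simp only [List.Perm.count_eq hperm]

-- ===== VERDICT (by name: the statement is the Claim_ definition above) =====
theorem inversion_set_to_count_spec : Claim_equal_inversion_set_to_count := by
  intro pairs vl _ hpre
  unfold Spec_inversion_set_to_count
  exact pv_main pairs vl hpre
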